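-- pv_equiv track=rewrite | github.com/Zain0o/python-qr-code-generator | matrix_masking.py | _calculate_penalty_rule3
-- ===== SOURCE A (Python) =====
-- from typing import List, Tuple, Union
--
-- QRMatrix = List[List[int]]  # Pure integer matrix for penalty calculations
--
-- def _calculate_penalty_rule3(matrix: QRMatrix) -> int:
--     """
--     Calculate penalty for Rule 3: Specific patterns resembling finder patterns.
--
--     Looks for patterns of 1:1:3:1:1 ratio (dark:light:dark:light:dark) with
--     4 light modules on either side. Each occurrence incurs 40 penalty points.
--
--     Args:
--         matrix: QR matrix to evaluate
--
--     Returns: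
--         int: Total penalty score for Rule 3
--     """
--     penalty = 0
--     size = len(matrix)
--
--     # Define patterns to search for (as per Thonky specification)
--     # Pattern: LLLL D L DDD L D or D L DDD L D LLLL
--     patterns_to_check_horizontal = [
--         [0, 0, 0, 0, 1, 0, 1, 1, 1, 0, 1],  # 00001011101
--         [1, 0, 1, 1, 1, 0, 1, 0, 0, 0, 0]  # 10111010000
--     ]
--     pat_len = 11
--
--     # Check rows for patterns
--     for r_idx in range(size):
--         for c_idx in range(size - pat_len + 1):
--             current_row_slice = matrix[r_idx][c_idx: c_idx + pat_len]
--             if current_row_slice == patterns_to_check_horizontal[0] or \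
--                     current_row_slice == patterns_to_check_horizontal[1]:
--                 penalty += 40
--
--     # Check columns for patterns
--     for c_idx in range(size):
--         for r_idx in range(size - pat_len + 1):
--             current_col_slice = [matrix[k][c_idx] for k in range(r_idx, r_idx + pat_len)]
--             if current_col_slice == patterns_to_check_horizontal[0] or \
--                     current_col_slice == patterns_to_check_horizontal[1]:
--                 penalty += 40
--
--     return penalty
-- ===== SOURCE B (Python) =====
-- def _calculate_penalty_rule3(matrix):
--     """One pass over the rows: every row and every column carries a rolling
--     base-4 register of its last 11 cells (digit 1/0 for dark/light, 2 for any
--     other value); a register equal to a pre-encoded pattern scores 40."""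
--     size = len(matrix)
--     if size < 11:
--         return 0
--     MOD = 4 ** 11
--
--     def code(v):
--         return 1 if v == 1 else (0 if v == 0 else 2)
--
--     P0 = 0
--     for b in (0, 0, 0, 0, 1, 0, 1, 1, 1, 0, 1):
--         P0 = P0 * 4 + b
--     P1 = 0
--     for b in (1, 0, 1, 1, 1, 0, 1, 0, 0, 0, 0):
--         P1 = P1 * 4 + b
--
--     hits = 0
--     col_regs = [0] * size
--     for r in range(size):
--         row = matrix[r]
--         col_regs = [(cr * 4 + code(row[c])) % MOD for c, cr in enumerate(col_regs)]
--         if r >= 10: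
--             hits += sum(1 for cr in col_regs if cr == P0 or cr == P1)
--         row_reg = 0
--         for c in range(size):
--             row_reg = (row_reg * 4 + code(row[c])) % MOD
--             if c >= 10 and (row_reg == P0 or row_reg == P1):
--                 hits += 1
--     return 40 * hits
-- ===== Notes on version B (the rewrite author's own statement) =====
-- stated objective: faster
-- what changed: Replaces A's window extraction and list comparison (an 11-element slice re-built and compared at every position of every row and column, columns materialised per position) by a single pass over the rows maintaining a rolling base-4 register of the last 11 cells for the current row and for every column, each register compared against the two pre-encoded pattern numbers in O(1) per cell.
import Mathlib
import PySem

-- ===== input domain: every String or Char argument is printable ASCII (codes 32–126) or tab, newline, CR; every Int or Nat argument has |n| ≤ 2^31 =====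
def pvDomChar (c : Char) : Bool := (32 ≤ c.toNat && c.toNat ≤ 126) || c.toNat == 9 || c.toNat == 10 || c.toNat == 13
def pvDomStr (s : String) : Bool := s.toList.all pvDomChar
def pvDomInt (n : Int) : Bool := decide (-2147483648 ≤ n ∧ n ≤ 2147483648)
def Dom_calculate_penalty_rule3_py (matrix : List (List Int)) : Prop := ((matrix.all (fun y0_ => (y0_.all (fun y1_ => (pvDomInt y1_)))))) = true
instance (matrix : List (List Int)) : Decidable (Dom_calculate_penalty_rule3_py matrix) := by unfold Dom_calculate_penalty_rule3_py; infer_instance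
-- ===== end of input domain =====

-- B replaces A's per-position window extraction (an 11-element slice rebuilt and compared at every
-- position of every row and column) by a single pass over the rows that maintains a rolling base-4
-- register of the last 11 cells for the current row and for every column, comparing each register
-- with the two pre-encoded pattern numbers (objective: faster by a constant factor, as measured).

-- ===== PORT A =====
def pvPat0 : List Int := [0, 0, 0, 0, 1, 0, 1, 1, 1, 0, 1]
def pvPat1 : List Int := [1, 0, 1, 1, 1, 0, 1, 0, 0, 0, 0]

def calculate_penalty_rule3_py (matrix : List (List Int)) : Int :=
  let size : Int := matrix.length
  let penRows : Int :=
    (PySem.List.pyRange 0 size).foldl (fun pen r =>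
      (PySem.List.pyRange 0 (size - 11 + 1)).foldl (fun pen c =>
        let sl := PySem.List.slice (PySem.List.pyGetD matrix r []) (some c) (some (c + 11))
        if sl = pvPat0 ∨ sl = pvPat1 then pen + 40 else pen) pen) 0
  (PySem.List.pyRange 0 size).foldl (fun pen c =>
    (PySem.List.pyRange 0 (size - 11 + 1)).foldl (fun pen r =>
      let sl := (PySem.List.pyRange r (r + 11)).map (fun k =>
        PySem.List.pyGetD (PySem.List.pyGetD matrix k []) c 0)
      if sl = pvPat0 ∨ sl = pvPat1 then pen + 40 else pen) pen) penRows

-- ===== PORT B =====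
def pvCode (v : Int) : Int := if v = 1 then 1 else if v = 0 then 0 else 2

def pvBP0 : Int := [(0:Int), 0, 0, 0, 1, 0, 1, 1, 1, 0, 1].foldl (fun a b => a * 4 + b) 0
def pvBP1 : Int := [(1:Int), 0, 1, 1, 1, 0, 1, 0, 0, 0, 0].foldl (fun a b => a * 4 + b) 0

def calculate_penalty_rule3_py_alt (matrix : List (List Int)) : Int :=
  let size := matrix.length
  if size < 11 then 0 else
  let res := (List.range size).foldl (fun (st : List Int × Int) (r : Nat) =>
    let row := PySem.List.pyGetD matrix (r : Int) []
    let col_regs := (PySem.List.enumerate st.1).map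
      (fun p => (p.2 * 4 + pvCode (PySem.List.pyGetD row p.1 0)) % 4 ^ 11)
    let hits := if 10 ≤ r then
        st.2 + ((col_regs.filter (fun cr => cr == pvBP0 || cr == pvBP1)).length : Int)
      else st.2
    let inner := (List.range size).foldl (fun (st2 : Int × Int) (c : Nat) =>
      let row_reg := (st2.1 * 4 + pvCode (PySem.List.pyGetD row (c : Int) 0)) % 4 ^ 11
      let hits2 := if 10 ≤ c ∧ (row_reg = pvBP0 ∨ row_reg = pvBP1) then st2.2 + 1 else st2.2
      (row_reg, hits2)) (0, hits)
    (col_regs, inner.2)) (List.replicate size 0, 0)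
  40 * res.2

-- ===== PRECONDITION & SPEC =====
-- A raises IndexError iff size ≥ 11 and some row is shorter than size (the column pass indexes
-- matrix[k][c] for all k < size, c < size); exactly those inputs are excluded.
def Pre_calculate_penalty_rule3_py (matrix : List (List Int)) : Prop :=
  matrix.length < 11 ∨ ∀ row ∈ matrix, matrix.length ≤ row.length
instance (matrix : List (List Int)) : Decidable (Pre_calculate_penalty_rule3_py matrix) := by
  unfold Pre_calculate_penalty_rule3_py; infer_instance

def pvWitness_calculate_penalty_rule3_py : List (List Int) :=
  [[0,0,0,0,1,0,1,1,1,0,1], [1,0,1,1,1,0,1,0,0,0,0], [0,0,0,0,0,0,0,0,0,0,0],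
   [1,1,1,1,1,1,1,1,1,1,1], [0,1,0,1,0,1,0,1,0,1,0], [0,0,0,0,1,0,1,1,1,0,1],
   [1,0,1,1,1,0,1,0,0,0,0], [0,0,0,0,0,0,0,0,0,0,0], [1,1,1,1,1,1,1,1,1,1,1],
   [0,1,0,1,0,1,0,1,0,1,0], [0,0,0,0,1,0,1,1,1,0,1]]

def Spec_calculate_penalty_rule3_py (matrix : List (List Int)) (out : Int) : Prop := out = calculate_penalty_rule3_py_alt matrix
instance (matrix : List (List Int)) (out : Int) : Decidable (Spec_calculate_penalty_rule3_py matrix out) := by unfold Spec_calculate_penalty_rule3_py; infer_instance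

-- ===== CLAIM (what is proved, stated in full; the proofs are below) =====
def Claim_equal_calculate_penalty_rule3_py : Prop := ∀ (matrix : List (List Int)), Dom_calculate_penalty_rule3_py matrix → Pre_calculate_penalty_rule3_py matrix → Spec_calculate_penalty_rule3_py matrix (calculate_penalty_rule3_py matrix)

-- ===== LEMMAS AND PROOFS =====

-- common semantic value of one line: number of window positions carrying either pattern
def pvWinB (l : List Int) (i : Nat) : Bool :=
  decide ((l.drop i).take 11 = pvPat0 ∨ (l.drop i).take 11 = pvPat1)
def pvCnt (l : List Int) : Nat := ((List.range (l.length - 10)).filter (pvWinB l)).length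

def pvRow (matrix : List (List Int)) (k : Nat) : List Int := PySem.List.pyGetD matrix (k : Int) []
def pvCol (matrix : List (List Int)) (c : Int) : List Int :=
  matrix.map (fun row => PySem.List.pyGetD row c 0)

-- B-side semantics: rolling register of a line prefix
def pvStepF (a v : Int) : Int := (a * 4 + pvCode v) % 4 ^ 11
def pvReg (l : List Int) : Int := l.foldl pvStepF 0
def pvVal (l : List Int) : Int := l.foldl (fun a v => a * 4 + pvCode v) 0
def pvMatchB (a : Int) : Bool := decide (a = pvBP0 ∨ a = pvBP1)
def pvMAt (l : List Int) (c : Nat) : Bool := pvMatchB (pvReg (l.take (c + 1)))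
def pvCntB (l : List Int) : Nat :=
  ((List.range l.length).filter (fun c => decide (10 ≤ c) && pvMAt l c)).length

lemma pvCode_bounds (v : Int) : 0 ≤ pvCode v ∧ pvCode v < 4 := by
  unfold pvCode; split_ifs <;> omega

lemma pvVal_aux (w : List Int) : ∀ a : Int,
    w.foldl (fun a v => a * 4 + pvCode v) a = a * 4 ^ w.length + pvVal w := by
  induction w with
  | nil => intro a; simp [pvVal]
  | cons x t ih =>
    intro a
    have hx : pvVal (x :: t) = pvCode x * 4 ^ t.length + pvVal t := by
      show t.foldl (fun a v => a * 4 + pvCode v) (0 * 4 + pvCode x) = _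
      rw [ih]; ring
    show t.foldl (fun a v => a * 4 + pvCode v) (a * 4 + pvCode x) = _
    rw [ih, hx]
    simp [List.length_cons]
    ring

lemma pvVal_append (u w : List Int) :
    pvVal (u ++ w) = pvVal u * 4 ^ w.length + pvVal w := by
  unfold pvVal
  rw [List.foldl_append]
  exact pvVal_aux w _

lemma pvVal_bounds (l : List Int) : 0 ≤ pvVal l ∧ pvVal l < 4 ^ l.length := by
  induction l with
  | nil => simp [pvVal]
  | cons x t ih =>
    have hx : pvVal (x :: t) = pvCode x * 4 ^ t.length + pvVal t := by
      show t.foldl (fun a v => a * 4 + pvCode v) (0 * 4 + pvCode x) = _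
      rw [pvVal_aux]; ring
    have hc := pvCode_bounds x
    have h4 : (0:Int) < 4 ^ t.length := by positivity
    constructor
    · rw [hx]; nlinarith [ih.1]
    · rw [hx, List.length_cons, pow_succ]
      nlinarith [ih.2]

lemma pvReg_eq (l : List Int) : pvReg l = pvVal (l.drop (l.length - 11)) := by
  induction l using List.reverseRecOn with
  | nil => simp [pvReg, pvVal]
  | append_singleton l x ih =>
    have hstep : pvReg (l ++ [x]) = (pvReg l * 4 + pvCode x) % 4 ^ 11 := by
      unfold pvReg; rw [List.foldl_append]; rfl
    by_cases h : l.length < 11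
    · have hd : l.drop (l.length - 11) = l := by
        rw [Nat.sub_eq_zero_of_le (by omega), List.drop_zero]
      have hd2 : (l ++ [x]).drop ((l ++ [x]).length - 11) = l ++ [x] := by
        rw [List.length_append, List.length_singleton,
          Nat.sub_eq_zero_of_le (by omega), List.drop_zero]
      have hx1 : pvVal [x] = pvCode x := by simp [pvVal]
      have he : pvVal l * 4 + pvCode x = pvVal (l ++ [x]) := by
        rw [pvVal_append, hx1, List.length_singleton, pow_one]
      rw [hstep, ih, hd, he, hd2]
      have hb := pvVal_bounds (l ++ [x])
      have hlen : (l ++ [x]).length ≤ 11 := by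
        rw [List.length_append, List.length_singleton]; omega
      refine Int.emod_eq_of_lt hb.1 ?_
      calc pvVal (l ++ [x]) < 4 ^ (l ++ [x]).length := hb.2
        _ ≤ 4 ^ 11 := pow_le_pow_right₀ (by norm_num) hlen
    · have h11 : 11 ≤ l.length := by omega
      have hidx : l.length - 11 < l.length := by omega
      have hd : l.drop (l.length - 11) = l[l.length - 11] :: l.drop (l.length - 10) := by
        have h1 : l.length - 11 + 1 = l.length - 10 := by omega
        rw [List.drop_eq_getElem_cons hidx, h1]
      have hd2 : (l ++ [x]).drop ((l ++ [x]).length - 11) = l.drop (l.length - 10) ++ [x] := by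
        rw [List.length_append, List.length_singleton]
        have : l.length + 1 - 11 = l.length - 10 := by omega
        rw [this, List.drop_append_of_le_length (by omega)]
      rw [hstep, ih, hd, hd2]
      have hcons0 : pvVal (l[l.length - 11] :: l.drop (l.length - 10))
          = pvCode l[l.length - 11] * 4 ^ (l.drop (l.length - 10)).length
            + pvVal (l.drop (l.length - 10)) := by
        show (l.drop (l.length - 10)).foldl (fun a v => a * 4 + pvCode v)
          (0 * 4 + pvCode l[l.length - 11]) = _
        rw [pvVal_aux]; ring
      have hlen10 : (l.drop (l.length - 10)).length = 10 := by
        rw [List.length_drop]; omega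
      have hx1 : pvVal [x] = pvCode x := by simp [pvVal]
      have happ : pvVal (l.drop (l.length - 10) ++ [x])
          = pvVal (l.drop (l.length - 10)) * 4 + pvCode x := by
        rw [pvVal_append, hx1, List.length_singleton, pow_one]
      have hcons : pvVal (l[l.length - 11] :: l.drop (l.length - 10))
          = pvCode l[l.length - 11] * 4 ^ 10 + pvVal (l.drop (l.length - 10)) := by
        rw [hcons0, hlen10]
      rw [hcons]
      have hb := pvVal_bounds (l.drop (l.length - 10) ++ [x])
      have hlen11 : (l.drop (l.length - 10) ++ [x]).length = 11 := by
        rw [List.length_append, List.length_singleton, hlen10]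
      have he : (pvCode l[l.length - 11] * 4 ^ 10 + pvVal (l.drop (l.length - 10))) * 4 + pvCode x
          = pvVal (l.drop (l.length - 10) ++ [x]) + 4 ^ 11 * pvCode l[l.length - 11] := by
        rw [happ]; ring
      rw [he, Int.add_mul_emod_self_left]
      refine Int.emod_eq_of_lt hb.1 ?_
      rw [hlen11] at hb
      exact hb.2

lemma pvVal_inj : ∀ u w : List Int, u.length = w.length → pvVal u = pvVal w →
    u.map pvCode = w.map pvCode := by
  intro u
  induction u using List.reverseRecOn with
  | nil =>
    intro w hl _
    have : w = [] := List.eq_nil_of_length_eq_zero hl.symm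
    simp [this]
  | append_singleton u x ih =>
    intro w hl hv
    induction w using List.reverseRecOn with
    | nil => simp at hl
    | append_singleton w y _ =>
      have hl' : u.length = w.length := by
        simp [List.length_append] at hl; omega
      rw [pvVal_append, pvVal_append] at hv
      simp only [List.length_singleton, pow_one] at hv
      have hx : pvVal [x] = pvCode x := by simp [pvVal]
      have hy : pvVal [y] = pvCode y := by simp [pvVal]
      rw [hx, hy] at hv
      have hbx := pvCode_bounds x
      have hby := pvCode_bounds y
      have hcode : pvCode x = pvCode y ∧ pvVal u = pvVal w := by omega
      rw [List.map_append, List.map_append, ih w hl' hcode.2]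
      simp [hcode.1]

lemma pvCode_map_inj (a b : List Int) (hb : ∀ x ∈ b, x = 0 ∨ x = 1) :
    a.map pvCode = b.map pvCode ↔ a = b := by
  constructor
  · intro h
    induction b generalizing a with
    | nil => simpa using h
    | cons y t ih =>
      cases a with
      | nil => simp at h
      | cons x xs =>
        simp only [List.map_cons, List.cons.injEq] at h
        obtain ⟨hh, ht⟩ := h
        have hy := hb y (by simp)
        have hx : x = y := by
          rcases hy with rfl | rfl <;>
            (unfold pvCode at hh; split_ifs at hh <;> simp_all)
        rw [hx, ih xs (fun z hz => hb z (by simp [hz])) ht]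
  · intro h; rw [h]

lemma pv_reg_window (l : List Int) (pat : List Int) (hpl : pat.length = 11)
    (hpb : ∀ x ∈ pat, x = 0 ∨ x = 1) (c : Nat) (h10 : 10 ≤ c) (hc : c < l.length) :
    pvReg (l.take (c + 1)) = pvVal pat ↔ (l.drop (c - 10)).take 11 = pat := by
  have hlen : (l.take (c + 1)).length = c + 1 := by
    rw [List.length_take]; omega
  have hw : (l.take (c + 1)).drop ((l.take (c + 1)).length - 11)
      = (l.drop (c - 10)).take 11 := by
    rw [hlen, List.drop_take]
    have h1 : c + 1 - 11 = c - 10 := by omega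
    have h2 : c + 1 - (c - 10) = 11 := by omega
    rw [h1, h2]
  have hwl : ((l.drop (c - 10)).take 11).length = 11 := by
    rw [List.length_take, List.length_drop]; omega
  rw [pvReg_eq, hw]
  constructor
  · intro h
    have := pvVal_inj _ pat (by rw [hwl, hpl]) h
    exact (pvCode_map_inj _ pat hpb).mp this
  · intro h; rw [h]

lemma pvBP0_eq : pvBP0 = pvVal pvPat0 := by decide
lemma pvBP1_eq : pvBP1 = pvVal pvPat1 := by decide

lemma pv_match_iff (l : List Int) (c : Nat) (h10 : 10 ≤ c) (hc : c < l.length) :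
    pvMAt l c = pvWinB l (c - 10) := by
  have h0 := pv_reg_window l pvPat0 (by decide) (by decide) c h10 hc
  have h1 := pv_reg_window l pvPat1 (by decide) (by decide) c h10 hc
  unfold pvMAt pvMatchB pvWinB
  rw [pvBP0_eq, pvBP1_eq]
  simp only [decide_eq_decide]
  rw [h0, h1]

lemma pv_cnt_shift (n : Nat) (p : Nat → Bool) :
    ((List.range n).filter (fun c => decide (10 ≤ c) && p (c - 10))).length
      = ((List.range (n - 10)).filter p).length := by
  induction n with
  | zero => rfl
  | succ k ih =>
    rw [List.range_succ, List.filter_append, List.length_append, ih]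
    by_cases h : 10 ≤ k
    · have : k + 1 - 10 = (k - 10) + 1 := by omega
      rw [this, List.range_succ, List.filter_append, List.length_append]
      cases hp : p (k - 10) <;> simp [h, hp]
    · have : k + 1 - 10 = 0 ∧ k - 10 = 0 := by omega
      rw [this.1, this.2]
      simp [h]

lemma pvCntB_eq (l : List Int) : pvCntB l = pvCnt l := by
  unfold pvCntB pvCnt
  rw [List.filter_congr (fun c hc => ?_), pv_cnt_shift l.length (pvWinB l)]
  rw [List.mem_range] at hc
  by_cases h : 10 ≤ c
  · simp only [decide_eq_true h, Bool.true_and]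
    exact pv_match_iff l c h hc
  · simp [decide_eq_false h]

lemma pv_indicator_sum (m : Nat) (p : Nat → Bool) :
    (((List.range m).filter p).length : Int) = ∑ i ∈ Finset.range m, (if p i then (1:Int) else 0) := by
  induction m with
  | zero => rfl
  | succ k ih =>
    rw [List.range_succ, List.filter_append, Finset.sum_range_succ, ← ih]
    by_cases h : p k <;> simp [h]

-- ===== A-side: each position loop counts the windows of its line =====

lemma pv_line_fold_aux (l : List Int) :
    ∀ (k i : Nat) (pen : Int), i + k = l.length - 10 → 11 ≤ l.length →
    (PySem.List.pyRange (i : Int) ((l.length : Int) - 11 + 1)).foldl (fun pen c =>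
        if PySem.List.slice l (some c) (some (c + 11)) = pvPat0 ∨
           PySem.List.slice l (some c) (some (c + 11)) = pvPat1 then pen + 40 else pen) pen
      = pen + 40 * ((((List.range' i k).filter (pvWinB l)).length : Nat) : Int) := by
  intro k
  induction k with
  | zero =>
    intro i pen hk h11
    rw [PySem.List.pyRange_one_eq_nil (by omega)]
    simp
  | succ k ih =>
    intro i pen hk h11
    rw [PySem.List.pyRange_one_cons (by omega), List.foldl_cons]
    have hsl : PySem.List.slice l (some (i : Int)) (some ((i : Int) + 11))
        = (l.drop i).take 11 := by
      have := PySem.List.slice_natCast_add l i 11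
      simpa using this
    have hcast : ((i : Int) + 1) = ((i + 1 : Nat) : Int) := by push_cast; ring
    rw [hcast, hsl]
    have hr : List.range' i (k + 1) = i :: List.range' (i + 1) k := List.range'_succ
    rw [hr, List.filter_cons]
    by_cases hwin : (l.drop i).take 11 = pvPat0 ∨ (l.drop i).take 11 = pvPat1
    · rw [if_pos hwin, ih (i + 1) (pen + 40) (by omega) h11]
      have : pvWinB l i = true := by unfold pvWinB; exact decide_eq_true hwin
      rw [this]
      simp only [if_true, List.length_cons]
      push_cast
      ring
    · rw [if_neg hwin, ih (i + 1) pen (by omega) h11]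
      have : pvWinB l i = false := by unfold pvWinB; exact decide_eq_false hwin
      rw [this]
      simp

lemma pv_line_fold (l : List Int) (size : Int) (hl : (l.length : Int) = size)
    (h11 : 11 ≤ l.length) (pen : Int) :
    (PySem.List.pyRange 0 (size - 11 + 1)).foldl (fun pen c =>
        if PySem.List.slice l (some c) (some (c + 11)) = pvPat0 ∨
           PySem.List.slice l (some c) (some (c + 11)) = pvPat1 then pen + 40 else pen) pen
      = pen + 40 * (pvCnt l : Int) := by
  subst hl
  have h := pv_line_fold_aux l (l.length - 10) 0 pen (by omega) h11
  rw [show ((0 : Nat) : Int) = 0 from rfl] at h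
  rw [h]
  unfold pvCnt
  rw [← List.range_eq_range']

lemma pv_col_slice (matrix : List (List Int)) (c : Int) (r : Nat)
    (h11 : r + 11 ≤ matrix.length) :
    (PySem.List.pyRange (r : Int) ((r : Int) + 11)).map (fun k =>
        PySem.List.pyGetD (PySem.List.pyGetD matrix k []) c 0)
      = PySem.List.slice (matrix.map (fun row => PySem.List.pyGetD row c 0))
          (some (r : Int)) (some ((r : Int) + 11)) := by
  have hslice : PySem.List.slice (matrix.map (fun row => PySem.List.pyGetD row c 0))
      (some (r : Int)) (some ((r : Int) + 11))
      = ((matrix.map (fun row => PySem.List.pyGetD row c 0)).drop r).take 11 := by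
    have := PySem.List.slice_natCast_add (matrix.map (fun row => PySem.List.pyGetD row c 0)) r 11
    simpa using this
  rw [hslice, ← List.map_drop, ← List.map_take]
  have hsplit := PySem.List.pyRange_one_append (r : Int) ((r : Int) + 11) (matrix.length : Int)
    (by omega) (by omega)
  have hfull : (PySem.List.pyRange (r : Int) ((matrix.length : Int))).map
      (fun k => PySem.List.pyGetD matrix k []) = matrix.drop r := by
    have := PySem.List.map_pyGetD_pyRange' matrix [] (a := (r : Int)) (by omega)
    simpa using this
  rw [hsplit, List.map_append] at hfull
  have hlen : ((PySem.List.pyRange (r : Int) ((r : Int) + 11)).map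
      (fun k => PySem.List.pyGetD matrix k [])).length = 11 := by
    rw [List.length_map, PySem.List.length_pyRange_one]
    omega
  have htake : (PySem.List.pyRange (r : Int) ((r : Int) + 11)).map
      (fun k => PySem.List.pyGetD matrix k []) = (matrix.drop r).take 11 := by
    rw [← hfull, ← hlen, List.take_left]
  calc (PySem.List.pyRange (r : Int) ((r : Int) + 11)).map (fun k =>
        PySem.List.pyGetD (PySem.List.pyGetD matrix k []) c 0)
      = ((PySem.List.pyRange (r : Int) ((r : Int) + 11)).map
          (fun k => PySem.List.pyGetD matrix k [])).map
          (fun row => PySem.List.pyGetD row c 0) := by rw [List.map_map]; rfl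
    _ = ((matrix.drop r).take 11).map (fun row => PySem.List.pyGetD row c 0) := by rw [htake]

lemma pv_foldl_id {α : Type} (l : List α) (x : Int) : l.foldl (fun a _ => a) x = x := by
  induction l generalizing x with
  | nil => rfl
  | cons y t ih => exact ih x

lemma pv_hA (matrix : List (List Int)) (h11 : 11 ≤ matrix.length)
    (hrows : ∀ row ∈ matrix, matrix.length ≤ row.length) :
    calculate_penalty_rule3_py matrix
      = (∑ k ∈ Finset.range matrix.length, 40 * (pvCnt ((pvRow matrix k).take matrix.length) : Int))
        + ∑ c ∈ Finset.range matrix.length, 40 * (pvCnt (pvCol matrix (c : Int)) : Int) := by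
  simp only [calculate_penalty_rule3_py]
  have hrow : ∀ r ∈ PySem.List.pyRange 0 (matrix.length : Int), ∀ pen : Int,
      (PySem.List.pyRange 0 ((matrix.length : Int) - 11 + 1)).foldl (fun pen c =>
        if PySem.List.slice (PySem.List.pyGetD matrix r []) (some c) (some (c + 11)) = pvPat0 ∨
           PySem.List.slice (PySem.List.pyGetD matrix r []) (some c) (some (c + 11)) = pvPat1
        then pen + 40 else pen) pen
      = pen + 40 * (pvCnt ((PySem.List.pyGetD matrix r []).take matrix.length) : Int) := by
    intro r hr pen
    rw [PySem.List.mem_pyRange_one] at hr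
    set row := PySem.List.pyGetD matrix r [] with hrowdef
    have hrowmem : row ∈ matrix := by
      rw [hrowdef, PySem.List.pyGetD_eq_getElem matrix [] hr.1 hr.2]
      exact List.getElem_mem _
    have hlen : matrix.length ≤ row.length := hrows row hrowmem
    have hsl : ∀ c ∈ PySem.List.pyRange 0 ((matrix.length : Int) - 11 + 1), ∀ pen2 : Int,
        (if PySem.List.slice row (some c) (some (c + 11)) = pvPat0 ∨
            PySem.List.slice row (some c) (some (c + 11)) = pvPat1 then pen2 + 40 else pen2)
      = (if PySem.List.slice (row.take matrix.length) (some c) (some (c + 11)) = pvPat0 ∨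
            PySem.List.slice (row.take matrix.length) (some c) (some (c + 11)) = pvPat1
         then pen2 + 40 else pen2) := by
      intro c hc pen2
      rw [PySem.List.mem_pyRange_one] at hc
      have h0 : c = ((c.toNat : Nat) : Int) := (Int.toNat_of_nonneg hc.1).symm
      have hcn : c.toNat + 11 ≤ matrix.length := by omega
      have e1 : PySem.List.slice row (some c) (some (c + 11)) = (row.drop c.toNat).take 11 := by
        rw [h0]; exact_mod_cast PySem.List.slice_natCast_add row c.toNat 11
      have e2 : PySem.List.slice (row.take matrix.length) (some c) (some (c + 11))
          = ((row.take matrix.length).drop c.toNat).take 11 := by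
        rw [h0]; exact_mod_cast PySem.List.slice_natCast_add (row.take matrix.length) c.toNat 11
      have e3 : ((row.take matrix.length).drop c.toNat).take 11 = (row.drop c.toNat).take 11 := by
        rw [List.drop_take, List.take_take]
        congr 1
        omega
      rw [e1, e2, e3]
    rw [PySem.List.foldl_congr_mem' _ _ _ pen hsl,
        pv_line_fold (row.take matrix.length) (matrix.length : Int)
          (by rw [List.length_take, Nat.min_eq_left hlen])
          (by rw [List.length_take, Nat.min_eq_left hlen]; omega) pen]
  rw [PySem.List.foldl_congr_mem' (PySem.List.pyRange 0 (matrix.length : Int)) _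
    (fun pen r => pen + 40 * (pvCnt ((PySem.List.pyGetD matrix r []).take matrix.length) : Int))
    0 hrow]
  rw [PySem.List.foldl_add (PySem.List.pyRange 0 (matrix.length : Int))
    (fun r => 40 * (pvCnt ((PySem.List.pyGetD matrix r []).take matrix.length) : Int)) 0]
  have hcol : ∀ c ∈ PySem.List.pyRange 0 (matrix.length : Int), ∀ pen : Int,
      (PySem.List.pyRange 0 ((matrix.length : Int) - 11 + 1)).foldl (fun pen r =>
        if (PySem.List.pyRange r (r + 11)).map (fun k =>
            PySem.List.pyGetD (PySem.List.pyGetD matrix k []) c 0) = pvPat0 ∨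
           (PySem.List.pyRange r (r + 11)).map (fun k =>
            PySem.List.pyGetD (PySem.List.pyGetD matrix k []) c 0) = pvPat1
         then pen + 40 else pen) pen
      = pen + 40 * (pvCnt (pvCol matrix c) : Int) := by
    intro c hc pen
    have hcolen : (pvCol matrix c).length = matrix.length := by
      unfold pvCol; rw [List.length_map]
    have hr : ∀ r ∈ PySem.List.pyRange 0 ((matrix.length : Int) - 11 + 1), ∀ pen2 : Int,
        (if (PySem.List.pyRange r (r + 11)).map (fun k =>
              PySem.List.pyGetD (PySem.List.pyGetD matrix k []) c 0) = pvPat0 ∨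
            (PySem.List.pyRange r (r + 11)).map (fun k =>
              PySem.List.pyGetD (PySem.List.pyGetD matrix k []) c 0) = pvPat1
         then pen2 + 40 else pen2)
      = (if PySem.List.slice (pvCol matrix c) (some r) (some (r + 11)) = pvPat0 ∨
            PySem.List.slice (pvCol matrix c) (some r) (some (r + 11)) = pvPat1
         then pen2 + 40 else pen2) := by
      intro r hrr pen2
      rw [PySem.List.mem_pyRange_one] at hrr
      have h0 : r = ((r.toNat : Nat) : Int) := (Int.toNat_of_nonneg hrr.1).symm
      rw [h0, pv_col_slice matrix c r.toNat (by omega)]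
      rfl
    rw [PySem.List.foldl_congr_mem' _ _ _ pen hr,
        pv_line_fold (pvCol matrix c) (matrix.length : Int)
          (by rw [hcolen]) (by omega) pen]
  rw [PySem.List.foldl_congr_mem' (PySem.List.pyRange 0 (matrix.length : Int)) _
    (fun pen c => pen + 40 * (pvCnt (pvCol matrix c) : Int)) _ hcol]
  rw [PySem.List.foldl_add (PySem.List.pyRange 0 (matrix.length : Int))
    (fun c => 40 * (pvCnt (pvCol matrix c) : Int)) _]
  rw [PySem.List.pyRange_zero_nat matrix.length, List.map_map, List.map_map]
  simp only [Function.comp_def]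
  have e1 : ((List.range matrix.length).map (fun k : Nat =>
      40 * (pvCnt ((PySem.List.pyGetD matrix ((k : Nat) : Int) []).take matrix.length) : Int))).sum
      = ∑ k ∈ Finset.range matrix.length, 40 * (pvCnt ((pvRow matrix k).take matrix.length) : Int) := rfl
  have e2 : ((List.range matrix.length).map (fun c : Nat =>
      40 * (pvCnt (pvCol matrix ((c : Nat) : Int)) : Int))).sum
      = ∑ c ∈ Finset.range matrix.length, 40 * (pvCnt (pvCol matrix (c : Int)) : Int) := rfl
  rw [e1, e2]
  omega

lemma pvReg_take_succ (l : List Int) (n : Nat) (hn : n < l.length) :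
    (pvReg (l.take n) * 4 + pvCode (l.getD n 0)) % 4 ^ 11 = pvReg (l.take (n + 1)) := by
  rw [List.take_succ_eq_append_getElem hn]
  unfold pvReg
  rw [List.foldl_append]
  rw [List.getD_eq_getElem l 0 hn]
  rfl

lemma pv_inner (row : List Int) : ∀ (n : Nat), n ≤ row.length → ∀ (h : Int),
    (List.range n).foldl (fun (st2 : Int × Int) (c : Nat) =>
        ((st2.1 * 4 + pvCode (PySem.List.pyGetD row (c : Int) 0)) % 4 ^ 11,
         if 10 ≤ c ∧ (((st2.1 * 4 + pvCode (PySem.List.pyGetD row (c : Int) 0)) % 4 ^ 11) = pvBP0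
             ∨ ((st2.1 * 4 + pvCode (PySem.List.pyGetD row (c : Int) 0)) % 4 ^ 11) = pvBP1)
         then st2.2 + 1 else st2.2)) (0, h)
      = (pvReg (row.take n),
         h + (((List.range n).filter (fun c => decide (10 ≤ c) && pvMAt row c)).length : Int)) := by
  intro n
  induction n with
  | zero => intro _ h; simp [pvReg]
  | succ m ih =>
    intro hm h
    rw [List.range_succ, List.foldl_append, ih (by omega) h, List.foldl_cons, List.foldl_nil]
    have hget : PySem.List.pyGetD row ((m : Nat) : Int) 0 = row.getD m 0 :=
      PySem.List.pyGetD_natCast row m 0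
    simp only [hget]
    rw [pvReg_take_succ row m (by omega)]
    rw [List.filter_append, List.length_append]
    have hsing : (List.filter (fun c => decide (10 ≤ c) && pvMAt row c) [m]).length
        = if 10 ≤ m ∧ (pvReg (row.take (m + 1)) = pvBP0 ∨ pvReg (row.take (m + 1)) = pvBP1)
          then 1 else 0 := by
      rw [List.filter_singleton]
      unfold pvMAt pvMatchB
      by_cases h10 : 10 ≤ m <;>
        by_cases hmm : pvReg (row.take (m + 1)) = pvBP0 ∨ pvReg (row.take (m + 1)) = pvBP1 <;>
        simp [h10, hmm]
    rw [Prod.mk.injEq]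
    refine ⟨rfl, ?_⟩
    rw [hsing]
    by_cases hcond : 10 ≤ m ∧ (pvReg (row.take (m + 1)) = pvBP0 ∨ pvReg (row.take (m + 1)) = pvBP1)
    · rw [if_pos hcond, if_pos hcond]; push_cast; ring
    · rw [if_neg hcond, if_neg hcond]; push_cast; ring

lemma pv_colregs (matrix : List (List Int)) (r : Nat) (hr : r < matrix.length) :
    ((PySem.List.enumerate ((List.range matrix.length).map
        (fun (c : Nat) => pvReg ((pvCol matrix (c : Int)).take r)))).map
      (fun p => (p.2 * 4 + pvCode (PySem.List.pyGetD
          (PySem.List.pyGetD matrix (r : Int) []) p.1 0)) % 4 ^ 11))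
      = (List.range matrix.length).map (fun (c : Nat) => pvReg ((pvCol matrix (c : Int)).take (r + 1))) := by
  set regs := (List.range matrix.length).map (fun (c : Nat) => pvReg ((pvCol matrix (c : Int)).take r)) with hregs
  have hlen : regs.length = matrix.length := by rw [hregs, List.length_map, List.length_range]
  rw [PySem.List.enumerate_eq_map_pyRange regs 0, List.map_map]
  have hlen2 : PySem.List.len regs = (matrix.length : Int) := by
    show ((regs.length : Nat) : Int) = _
    rw [hlen]
  rw [hlen2, PySem.List.pyRange_zero_nat matrix.length, List.map_map]
  apply List.map_congr_left
  intro k hk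
  rw [List.mem_range] at hk
  simp only [Function.comp_apply]
  have h1 : PySem.List.pyGetD regs ((k : Nat) : Int) 0 = pvReg ((pvCol matrix (k : Int)).take r) := by
    rw [PySem.List.pyGetD_natCast, hregs, PySem.List.getD_map_range _ _ _ _ hk]
  have hrowg : PySem.List.pyGetD matrix ((r : Nat) : Int) [] = matrix[r] := by
    rw [PySem.List.pyGetD_natCast, List.getD_eq_getElem?_getD, List.getElem?_eq_getElem hr]
    rfl
  have hcolen : (pvCol matrix (k : Int)).length = matrix.length := by
    unfold pvCol; rw [List.length_map]
  have h2 : PySem.List.pyGetD (PySem.List.pyGetD matrix ((r : Nat) : Int) []) ((k : Nat) : Int) 0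
      = (pvCol matrix (k : Int)).getD r 0 := by
    rw [hrowg]
    unfold pvCol
    rw [List.getD_eq_getElem _ 0 (by rw [List.length_map]; omega), List.getElem_map]
  rw [h1, h2]
  exact pvReg_take_succ (pvCol matrix (k : Int)) r (by omega)

lemma pv_matchfun : (fun cr : Int => cr == pvBP0 || cr == pvBP1) = pvMatchB := by
  funext cr
  unfold pvMatchB
  by_cases h0 : cr = pvBP0 <;> by_cases h1 : cr = pvBP1 <;> simp [h0, h1]

lemma pv_outer (matrix : List (List Int))
    (hrows : ∀ row ∈ matrix, matrix.length ≤ row.length) :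
    ∀ (r : Nat), r ≤ matrix.length →
    ((List.range r).foldl (fun (st : List Int × Int) (rr : Nat) =>
        ((PySem.List.enumerate st.1).map
          (fun p => (p.2 * 4 + pvCode (PySem.List.pyGetD
              (PySem.List.pyGetD matrix (rr : Int) []) p.1 0)) % 4 ^ 11),
         ((List.range matrix.length).foldl (fun (st2 : Int × Int) (c : Nat) =>
            ((st2.1 * 4 + pvCode (PySem.List.pyGetD (PySem.List.pyGetD matrix (rr : Int) []) (c : Int) 0)) % 4 ^ 11,
             if 10 ≤ c ∧ (((st2.1 * 4 + pvCode (PySem.List.pyGetD (PySem.List.pyGetD matrix (rr : Int) []) (c : Int) 0)) % 4 ^ 11) = pvBP0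
                 ∨ ((st2.1 * 4 + pvCode (PySem.List.pyGetD (PySem.List.pyGetD matrix (rr : Int) []) (c : Int) 0)) % 4 ^ 11) = pvBP1)
             then st2.2 + 1 else st2.2))
           (0, if 10 ≤ rr then
              st.2 + ((((PySem.List.enumerate st.1).map
                (fun p => (p.2 * 4 + pvCode (PySem.List.pyGetD
                    (PySem.List.pyGetD matrix (rr : Int) []) p.1 0)) % 4 ^ 11)).filter
                  (fun cr => cr == pvBP0 || cr == pvBP1)).length : Int)
            else st.2)).2))
      (List.replicate matrix.length 0, 0))
    = ((List.range matrix.length).map (fun (c : Nat) => pvReg ((pvCol matrix (c : Int)).take r)),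
       ∑ k ∈ Finset.range r,
         ((((List.range matrix.length).filter
             (fun (c : Nat) => decide (10 ≤ c) && pvMAt (pvRow matrix k) c)).length : Int)
          + if 10 ≤ k then
              (((List.range matrix.length).filter
                (fun (c : Nat) => pvMAt (pvCol matrix (c : Int)) k)).length : Int)
            else 0)) := by
  intro r
  induction r with
  | zero =>
    intro _
    rw [List.range_zero, List.foldl_nil, Finset.range_zero, Finset.sum_empty]
    rw [Prod.mk.injEq]
    refine ⟨?_, rfl⟩
    symm
    rw [List.eq_replicate_iff]
    refine ⟨by rw [List.length_map, List.length_range], ?_⟩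
    intro b hb
    rw [List.mem_map] at hb
    obtain ⟨c, _, rfl⟩ := hb
    simp [pvReg]
  | succ m ih =>
    intro hm
    rw [List.range_succ, List.foldl_append, ih (by omega), List.foldl_cons, List.foldl_nil]
    have hrowg : PySem.List.pyGetD matrix ((m : Nat) : Int) [] = matrix[m]'(by omega) := by
      rw [PySem.List.pyGetD_natCast, List.getD_eq_getElem?_getD,
        List.getElem?_eq_getElem (by omega)]
      rfl
    have hrlen : matrix.length ≤ (PySem.List.pyGetD matrix ((m : Nat) : Int) []).length := by
      rw [hrowg]
      exact hrows _ (List.getElem_mem _)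
    rw [pv_colregs matrix m (by omega)]
    rw [pv_inner (PySem.List.pyGetD matrix ((m : Nat) : Int) []) matrix.length (by omega)]
    rw [Prod.mk.injEq]
    refine ⟨rfl, ?_⟩
    rw [Finset.sum_range_succ]
    have hcolcnt : ((((List.range matrix.length).map
          (fun (c : Nat) => pvReg ((pvCol matrix (c : Int)).take (m + 1)))).filter
            (fun cr => cr == pvBP0 || cr == pvBP1)).length : Int)
        = (((List.range matrix.length).filter
            (fun (c : Nat) => pvMAt (pvCol matrix (c : Int)) m)).length : Int) := by
      rw [pv_matchfun, List.filter_map, List.length_map]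
      rfl
    have hMAt : (fun (c : Nat) => decide (10 ≤ c) && pvMAt (PySem.List.pyGetD matrix ((m : Nat) : Int) []) c)
        = (fun (c : Nat) => decide (10 ≤ c) && pvMAt (pvRow matrix m) c) := rfl
    rw [hMAt]
    by_cases h10 : 10 ≤ m
    · rw [if_pos h10, if_pos h10, hcolcnt]
      ring
    · rw [if_neg h10, if_neg h10]
      ring

lemma pv_hB (matrix : List (List Int)) (h11 : 11 ≤ matrix.length)
    (hrows : ∀ row ∈ matrix, matrix.length ≤ row.length) :
    calculate_penalty_rule3_py_alt matrix
      = (∑ k ∈ Finset.range matrix.length, 40 * (pvCnt ((pvRow matrix k).take matrix.length) : Int))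
        + ∑ c ∈ Finset.range matrix.length, 40 * (pvCnt (pvCol matrix (c : Int)) : Int) := by
  simp only [calculate_penalty_rule3_py_alt]
  rw [if_neg (by omega)]
  rw [pv_outer matrix hrows matrix.length le_rfl]
  have hrowterm : ∀ k ∈ Finset.range matrix.length,
      (((List.range matrix.length).filter
          (fun (c : Nat) => decide (10 ≤ c) && pvMAt (pvRow matrix k) c)).length : Int)
        = (pvCnt ((pvRow matrix k).take matrix.length) : Int) := by
    intro k hk
    rw [Finset.mem_range] at hk
    have hlen : matrix.length ≤ (pvRow matrix k).length := by
      unfold pvRow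
      rw [PySem.List.pyGetD_natCast, List.getD_eq_getElem?_getD,
        List.getElem?_eq_getElem hk]
      exact hrows _ (List.getElem_mem _)
    have hlt : ((pvRow matrix k).take matrix.length).length = matrix.length := by
      rw [List.length_take]; omega
    have hcongr : ∀ c ∈ List.range matrix.length,
        (decide (10 ≤ c) && pvMAt (pvRow matrix k) c)
          = (decide (10 ≤ c) && pvMAt ((pvRow matrix k).take matrix.length) c) := by
      intro c hc
      rw [List.mem_range] at hc
      have : ((pvRow matrix k).take matrix.length).take (c + 1) = (pvRow matrix k).take (c + 1) := by
        rw [List.take_take, Nat.min_eq_left (by omega)]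
      unfold pvMAt
      rw [this]
    rw [List.filter_congr hcongr]
    rw [← pvCntB_eq]
    unfold pvCntB
    rw [hlt]
  rw [Finset.sum_congr rfl (fun k hk => congrArg (fun x => x + _) (hrowterm k hk))]
  have hcolterm : ∀ k : Nat,
      (if 10 ≤ k then
        (((List.range matrix.length).filter
          (fun (c : Nat) => pvMAt (pvCol matrix (c : Int)) k)).length : Int)
       else 0)
      = ∑ c ∈ Finset.range matrix.length,
          (if decide (10 ≤ k) && pvMAt (pvCol matrix (c : Int)) k then (1:Int) else 0) := by
    intro k
    by_cases h10 : 10 ≤ k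
    · rw [if_pos h10, pv_indicator_sum]
      refine Finset.sum_congr rfl (fun c _ => ?_)
      simp [h10]
    · rw [if_neg h10]
      symm
      refine Finset.sum_eq_zero (fun c _ => ?_)
      simp [h10]
  have hswap : ∑ k ∈ Finset.range matrix.length,
      (if 10 ≤ k then
        (((List.range matrix.length).filter
          (fun (c : Nat) => pvMAt (pvCol matrix (c : Int)) k)).length : Int)
       else 0)
      = ∑ c ∈ Finset.range matrix.length, (pvCnt (pvCol matrix (c : Int)) : Int) := by
    rw [Finset.sum_congr rfl (fun k _ => hcolterm k), Finset.sum_comm]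
    refine Finset.sum_congr rfl (fun c _ => ?_)
    have hcolen : (pvCol matrix (c : Int)).length = matrix.length := by
      unfold pvCol; rw [List.length_map]
    rw [← pv_indicator_sum matrix.length (fun (k : Nat) => decide (10 ≤ k) && pvMAt (pvCol matrix (c : Int)) k)]
    rw [← pvCntB_eq]
    unfold pvCntB
    rw [hcolen]
  rw [Finset.sum_add_distrib, hswap]
  have hsnd : ∀ (a : List Int) (b : Int), (a, b).2 = b := fun _ _ => rfl
  rw [hsnd, mul_add, Finset.mul_sum, Finset.mul_sum]

-- ===== VERDICT (by name: the statement is the Claim_ definition above) =====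
theorem calculate_penalty_rule3_py_spec : Claim_equal_calculate_penalty_rule3_py := by
  intro matrix _hdom hpre
  unfold Spec_calculate_penalty_rule3_py
  unfold Pre_calculate_penalty_rule3_py at hpre
  by_cases hN : matrix.length < 11
  · have hA : calculate_penalty_rule3_py matrix = 0 := by
      simp only [calculate_penalty_rule3_py]
      rw [PySem.List.pyRange_one_eq_nil (show ((matrix.length:Int) - 11 + 1) ≤ 0 by omega)]
      simp only [List.foldl_nil]
      rw [pv_foldl_id, pv_foldl_id]
    have hB : calculate_penalty_rule3_py_alt matrix = 0 := by
      simp only [calculate_penalty_rule3_py_alt]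
      rw [if_pos hN]
    rw [hA, hB]
  · have hrows : ∀ row ∈ matrix, matrix.length ≤ row.length := by
      rcases hpre with h | h
      · omega
      · exact h
    rw [pv_hA matrix (by omega) hrows, pv_hB matrix (by omega) hrows]
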